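-- pv_equiv track=rewrite | github.com/Wind010/advent_of_code | 2025/05/part1.py | find_fresh_ids
-- ===== SOURCE A (Python) =====
-- def find_fresh_ids(fresh_range, ids):
--     fresh_ids = []
--     for id in ids:
--         for r in fresh_range:
--             if id in r:
--                 fresh_ids.append(id)
--                 break
--     return fresh_ids
-- ===== SOURCE B (Python) =====
-- def find_fresh_ids(fresh_range, ids):
--     pool = set()
--     for r in fresh_range:
--         pool.update(r)
--     return [id for id in ids if id in pool]
-- ===== Notes on version B (the rewrite author's own statement) =====
-- stated objective: faster
-- what changed: B builds one hash set of all range members up front and filters ids by a single membership test each, replacing A's inner linear scan over every range per id.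
import Mathlib
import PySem

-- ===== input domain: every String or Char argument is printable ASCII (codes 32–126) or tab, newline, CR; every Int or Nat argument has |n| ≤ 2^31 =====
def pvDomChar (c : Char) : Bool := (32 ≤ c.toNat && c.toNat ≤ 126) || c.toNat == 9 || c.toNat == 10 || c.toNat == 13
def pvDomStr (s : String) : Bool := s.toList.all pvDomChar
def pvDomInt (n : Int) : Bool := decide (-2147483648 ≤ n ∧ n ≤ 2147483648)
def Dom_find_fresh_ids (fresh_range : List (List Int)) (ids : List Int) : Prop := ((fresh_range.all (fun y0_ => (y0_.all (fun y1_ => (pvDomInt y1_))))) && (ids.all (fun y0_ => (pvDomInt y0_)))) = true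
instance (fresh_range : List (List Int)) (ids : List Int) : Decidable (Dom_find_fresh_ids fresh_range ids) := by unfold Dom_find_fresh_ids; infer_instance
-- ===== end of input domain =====

-- B replaces A's per-id linear scan over every range by one set built up front and a single membership test per id (objective: faster).

-- ===== PORT A =====
-- inner 'for r in fresh_range: if id in r: … break' — true iff some range list contains id (stops at the first)
def pvInnerA (id : Int) : List (List Int) → Bool
  | [] => false
  | r :: rs => if r.contains id then true else pvInnerA id rs

def find_fresh_ids (fresh_range : List (List Int)) (ids : List Int) : List Int :=
  ids.foldl (fun fresh_ids id => if pvInnerA id fresh_range then fresh_ids ++ [id] else fresh_ids) []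

-- ===== PORT B =====
def find_fresh_ids_alt (fresh_range : List (List Int)) (ids : List Int) : List Int :=
  let pool : PySem.Set Int := fresh_range.foldl (fun s r => PySem.Set.update s r) PySem.Set.empty
  ids.filter (fun id => PySem.Set.contains pool id)

-- ===== PRECONDITION & SPEC =====
def Spec_find_fresh_ids (fresh_range : List (List Int)) (ids : List Int) (out : List Int) : Prop := out = find_fresh_ids_alt fresh_range ids
instance (fresh_range : List (List Int)) (ids : List Int) (out : List Int) : Decidable (Spec_find_fresh_ids fresh_range ids out) := by unfold Spec_find_fresh_ids; infer_instance

-- ===== CLAIM (what is proved, stated in full; the proofs are below) =====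
def Claim_equal_find_fresh_ids : Prop := ∀ (fresh_range : List (List Int)) (ids : List Int), Dom_find_fresh_ids fresh_range ids → Spec_find_fresh_ids fresh_range ids (find_fresh_ids fresh_range ids)

-- ===== LEMMAS AND PROOFS =====

theorem pv_mem_foldl_update (l : List (List Int)) (s : PySem.Set Int) (x : Int) :
    x ∈ l.foldl (fun s r => PySem.Set.update s r) s ↔ x ∈ s ∨ ∃ r ∈ l, x ∈ r := by
  induction l generalizing s with
  | nil => simp
  | cons r rs ih =>
    simp only [List.foldl_cons, ih, PySem.Set.mem_update, List.mem_cons]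
    constructor
    · rintro (⟨h | h⟩ | ⟨t, ht, hx⟩)
      · exact Or.inl h
      · exact Or.inr ⟨r, Or.inl rfl, h⟩
      · exact Or.inr ⟨t, Or.inr ht, hx⟩
    · rintro (h | ⟨t, (rfl | ht), hx⟩)
      · exact Or.inl (Or.inl h)
      · exact Or.inl (Or.inr hx)
      · exact Or.inr ⟨t, ht, hx⟩

theorem pv_innerA_eq_any (id : Int) (l : List (List Int)) :
    pvInnerA id l = l.any (fun r => r.contains id) := by
  induction l with
  | nil => rfl
  | cons r rs ih =>
    simp only [pvInnerA, ih, List.any_cons]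
    cases r.contains id <;> simp

theorem pv_innerA_iff (id : Int) (l : List (List Int)) :
    pvInnerA id l = true ↔ ∃ r ∈ l, id ∈ r := by
  simp [pv_innerA_eq_any, List.any_eq_true]

theorem pv_foldl_filter (p : Int → Bool) (ids : List Int) (acc : List Int) :
    ids.foldl (fun fresh_ids id => if p id then fresh_ids ++ [id] else fresh_ids) acc
      = acc ++ ids.filter p := by
  induction ids generalizing acc with
  | nil => simp
  | cons i is ih =>
    by_cases h : p i <;> simp [h, ih]

-- ===== VERDICT (by name: the statement is the Claim_ definition above) =====
theorem find_fresh_ids_spec : Claim_equal_find_fresh_ids := by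
  intro fresh_range ids _
  unfold Spec_find_fresh_ids find_fresh_ids find_fresh_ids_alt
  rw [pv_foldl_filter, List.nil_append]
  apply List.filter_congr
  intro id _
  have h2 : ((fresh_range.foldl (fun s r => PySem.Set.update s r) PySem.Set.empty).contains id = true)
      ↔ ∃ r ∈ fresh_range, id ∈ r := by
    rw [PySem.Set.contains_iff, pv_mem_foldl_update]
    simp [PySem.Set.empty]
  rw [Bool.eq_iff_iff, pv_innerA_iff, h2]
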